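-- pv_equiv track=rewrite | github.com/HumbleUnicorn/Advent-of-Code | src/solutions/2023-py/aoc02.py | minPossible
-- ===== SOURCE A (Python) =====
-- def minPossible(gameData):
--     power = []
--     for game in gameData:
--         r = 0
--         g = 0
--         b = 0
--         for i in range(1,len(game)):
--             trial = game[i]
--             rT = trial[0]
--             gT = trial[1]
--             bT = trial[2]
--             if rT > r:
--                 r = rT
--             if gT > g:
--                 g = gT
--             if bT > b:
--                 b = bT
--         power.append(r*g*b)
--     return(power)
-- ===== SOURCE B (Python) =====
-- def sortedMax(values):
--     # max of a column, via sort-then-last; the prepended 0 is the floor for empty columns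
--     return sorted([0] + values)[-1]
--
-- def minPossible(gameData):
--     return [sortedMax([t[0] for t in g[1:]])
--             * sortedMax([t[1] for t in g[1:]])
--             * sortedMax([t[2] for t in g[1:]])
--             for g in gameData]
-- ===== Notes on version B (the rewrite author's own statement) =====
-- stated objective: alternative
-- what changed: Replaces A's single row-major pass with three running-max conditionals by a sort-based column decomposition: for each game and each colour channel, sort [0]+column and take the last element as the channel maximum, then multiply.
import Mathlib
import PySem

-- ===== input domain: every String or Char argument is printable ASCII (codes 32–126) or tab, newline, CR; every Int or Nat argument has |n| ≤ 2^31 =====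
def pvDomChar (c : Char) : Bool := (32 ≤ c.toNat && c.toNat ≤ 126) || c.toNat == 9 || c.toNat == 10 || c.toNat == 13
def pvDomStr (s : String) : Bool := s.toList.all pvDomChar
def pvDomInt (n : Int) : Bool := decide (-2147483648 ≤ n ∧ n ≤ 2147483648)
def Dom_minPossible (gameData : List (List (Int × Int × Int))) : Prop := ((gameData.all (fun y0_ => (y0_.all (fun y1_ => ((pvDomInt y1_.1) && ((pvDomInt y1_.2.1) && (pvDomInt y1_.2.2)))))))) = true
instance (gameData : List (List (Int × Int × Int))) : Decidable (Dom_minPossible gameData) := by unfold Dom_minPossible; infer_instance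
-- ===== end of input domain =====

-- B replaces A's row-major running-max loop by a sort-then-take-last computation of each colour
-- channel's maximum (a different mechanism of similar size, not claimed faster).

-- ===== PORT A =====
def minPossible (gameData : List (List (Int × Int × Int))) : List Int :=
  gameData.foldl (fun power game =>
    let st := (PySem.List.pyRange 1 (game.length : Int) 1).foldl
      (fun (s : Int × Int × Int) i =>
        let trial := PySem.List.pyGetD game i (0, 0, 0)  -- index always in range in A
        let r := if trial.1 > s.1 then trial.1 else s.1
        let g := if trial.2.1 > s.2.1 then trial.2.1 else s.2.1
        let b := if trial.2.2 > s.2.2 then trial.2.2 else s.2.2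
        (r, g, b)) (0, 0, 0)
    power ++ [st.1 * st.2.1 * st.2.2]) []

-- ===== PORT B =====
-- sortedMax(values) = sorted([0] + values)[-1]; the sorted list contains 0, hence is
-- nonempty, so the [-1] index never raises and the .getD 0 default is never used.
def sortedMaxL (values : List Int) : Int :=
  (PySem.List.pyGet? (PySem.List.sorted ((0 : Int) :: values) (fun x => x) false) (-1)).getD 0

def minPossible_alt (gameData : List (List (Int × Int × Int))) : List Int :=
  gameData.map (fun g =>
    sortedMaxL ((PySem.List.slice g (some 1) none).map (fun t => t.1))
    * sortedMaxL ((PySem.List.slice g (some 1) none).map (fun t => t.2.1))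
    * sortedMaxL ((PySem.List.slice g (some 1) none).map (fun t => t.2.2)))

-- ===== PRECONDITION & SPEC =====
def Spec_minPossible (gameData : List (List (Int × Int × Int))) (out : List Int) : Prop := out = minPossible_alt gameData
instance (gameData : List (List (Int × Int × Int))) (out : List Int) : Decidable (Spec_minPossible gameData out) := by unfold Spec_minPossible; infer_instance

-- ===== CLAIM (what is proved, stated in full; the proofs are below) =====
def Claim_equal_minPossible : Prop := ∀ (gameData : List (List (Int × Int × Int))), Dom_minPossible gameData → Spec_minPossible gameData (minPossible gameData)

-- ===== LEMMAS AND PROOFS =====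

-- The last element of sorted([0] + values) is the running max of values started at 0.
theorem pv_sortedMaxL_eq (xs : List Int) : sortedMaxL xs = xs.foldl max 0 := by
  unfold sortedMaxL
  rw [PySem.List.pyGet?_neg_one]
  have hperm : (PySem.List.sorted ((0 : Int) :: xs) (fun x => x) false).Perm ((0 : Int) :: xs) :=
    PySem.List.sorted_perm _ _ _
  set s := PySem.List.sorted ((0 : Int) :: xs) (fun x => x) false with hs
  have hne : s ≠ [] := by
    intro h
    have := hperm.length_eq
    simp [h] at this
  rw [List.getLast?_eq_some_getLast hne]
  simp only [Option.getD_some]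
  have hmem : s.getLast hne ∈ (0 : Int) :: xs := hperm.mem_iff.mp (List.getLast_mem hne)
  have hmax := PySem.List.le_foldl_max xs (0 : Int)
  -- getLast ≤ foldl max 0 xs
  have h1 : s.getLast hne ≤ xs.foldl max 0 := by
    rcases List.mem_cons.mp hmem with h | h
    · rw [h]; exact hmax.1
    · exact hmax.2 _ h
  -- foldl max 0 xs ≤ getLast (it is a member of s, and s is sorted)
  have hmemfold : xs.foldl max 0 ∈ s := by
    rw [hperm.mem_iff]
    rcases PySem.List.foldl_max_mem xs (0 : Int) with h | h
    · rw [h]; exact List.mem_cons_self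
    · exact List.mem_cons_of_mem _ h
  obtain ⟨p, hp, hpe⟩ := List.getElem_of_mem hmemfold
  have h2 : xs.foldl max 0 ≤ s.getLast hne := by
    rw [List.getLast_eq_getElem hne, ← hpe]
    exact PySem.List.sorted_id_getElem_mono ((0 : Int) :: xs) (show p ≤ s.length - 1 by omega)
      (Nat.sub_lt (List.length_pos_of_ne_nil hne) one_pos)
  omega

-- The triple-valued running-max fold computes the three column maxima component-wise.
theorem pv_fold_triple (ts : List (Int × Int × Int)) (s : Int × Int × Int) :
    ts.foldl (fun (s : Int × Int × Int) t =>
        (if t.1 > s.1 then t.1 else s.1,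
         if t.2.1 > s.2.1 then t.2.1 else s.2.1,
         if t.2.2 > s.2.2 then t.2.2 else s.2.2)) s
    = ((ts.map (fun t => t.1)).foldl max s.1,
       (ts.map (fun t => t.2.1)).foldl max s.2.1,
       (ts.map (fun t => t.2.2)).foldl max s.2.2) := by
  induction ts generalizing s with
  | nil => rfl
  | cons t ts ih =>
    simp only [List.foldl_cons, List.map_cons, ih]
    congr 1 <;> [skip; congr 1] <;> congr 1 <;> split <;> omega

theorem pv_per_game (game : List (Int × Int × Int)) :
    (PySem.List.pyRange 1 (game.length : Int) 1).foldl
      (fun (s : Int × Int × Int) i =>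
        let trial := PySem.List.pyGetD game i (0, 0, 0)
        (if trial.1 > s.1 then trial.1 else s.1,
         if trial.2.1 > s.2.1 then trial.2.1 else s.2.1,
         if trial.2.2 > s.2.2 then trial.2.2 else s.2.2)) (0, 0, 0)
    = (((game.drop 1).map (fun t => t.1)).foldl max 0,
       ((game.drop 1).map (fun t => t.2.1)).foldl max 0,
       ((game.drop 1).map (fun t => t.2.2)).foldl max 0) := by
  rw [PySem.List.foldl_pyRange_pyGetD' game (0,0,0)
      (fun (s : Int × Int × Int) trial =>
        (if trial.1 > s.1 then trial.1 else s.1,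
         if trial.2.1 > s.2.1 then trial.2.1 else s.2.1,
         if trial.2.2 > s.2.2 then trial.2.2 else s.2.2)) (0,0,0) (show (0:Int) ≤ 1 by norm_num)]
  exact pv_fold_triple _ _

-- ===== VERDICT (by name: the statement is the Claim_ definition above) =====
theorem minPossible_spec : Claim_equal_minPossible := by
  intro gameData _
  unfold Spec_minPossible minPossible minPossible_alt
  rw [PySem.List.foldl_append_singleton_eq_map]
  refine List.map_congr_left (fun game _ => ?_)
  simp only [pv_per_game, pv_sortedMaxL_eq, PySem.List.slice_from game (show (0:Int) ≤ 1 by norm_num)]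
  norm_num
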